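-- pv_equiv track=rewrite | github.com/sinaahmadi/KurdishTokenization | lex_to_json.py | create_compounds
-- ===== SOURCE A (Python) =====
-- def create_compounds(s):
-- 	# generate all the possible combinations of the composing subtokens of the compound word
-- 	# - are to be replaced by spaces or removed
-- 	# e.g. pel-û-po -> pel û po, pelû po, pel ûpo, pelûpo
-- 	# e.g. parêz-kirdin -> parêz kirdin, parêzkirdin
--     head, _, rest = s.partition('-')
--     if len(rest) == 0:
--         yield head
--     else:
--         for c in create_compounds(rest):
--             yield f'{head}-{c}'
--             yield f'{head} {c}'
-- ===== SOURCE B (Python) =====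
-- def create_compounds(s):
--     # bitmask enumeration: each of the n separator positions is '-' (bit 0) or ' ' (bit 1),
--     # the leftmost separator varying fastest; a trailing '-' delimits nothing (partition
--     # leaves an empty rest there), so a final empty part is dropped.
--     parts = s.split('-')
--     if len(parts) > 1 and parts[-1] == '':
--         parts.pop()
--     n = len(parts) - 1
--     for mask in range(1 << n):
--         out = parts[0]
--         m = mask
--         for p in parts[1:]:
--             out += (' ' if m & 1 else '-') + p
--             m >>= 1
--         yield out
-- ===== Notes on version B (the rewrite author's own statement) =====
-- stated objective: alternative
-- what changed: Replaces A's recursive generator (partition on the first '-' and recurse on the rest) by a non-recursive bitmask enumeration: split once on '-', then for each mask in range(2**n) join the parts with '-' or ' ' chosen by the mask's bits (bit 0 = leftmost separator), reproducing A's exact order.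
import Mathlib
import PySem

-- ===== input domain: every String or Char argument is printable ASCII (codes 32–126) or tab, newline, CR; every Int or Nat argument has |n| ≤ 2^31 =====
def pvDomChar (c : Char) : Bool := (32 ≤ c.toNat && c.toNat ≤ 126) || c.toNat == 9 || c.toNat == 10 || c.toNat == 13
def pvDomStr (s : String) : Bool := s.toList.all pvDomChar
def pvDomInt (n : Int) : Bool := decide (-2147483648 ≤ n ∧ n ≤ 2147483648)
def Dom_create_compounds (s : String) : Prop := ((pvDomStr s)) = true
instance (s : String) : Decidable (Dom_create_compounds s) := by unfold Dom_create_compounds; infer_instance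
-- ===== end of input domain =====

-- B replaces A's recursive generator by a single bitmask enumeration of the separator
-- choices (objective: alternative/idiomatic; same output list in the same order).

-- ===== PORT A =====
-- s.partition('-') ported by hand (exact for a one-character separator):
-- head = chars before the first '-', rest = chars after it ([] when '-' is absent).
def pvCoreA (cs : List Char) : List (List Char) :=
  if h : ((cs.dropWhile (· ≠ '-')).drop 1) = [] then
    [cs.takeWhile (· ≠ '-')]
  else
    (pvCoreA ((cs.dropWhile (· ≠ '-')).drop 1)).flatMap
      (fun c => [cs.takeWhile (· ≠ '-') ++ '-' :: c, cs.takeWhile (· ≠ '-') ++ ' ' :: c])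
termination_by cs.length
decreasing_by
  have hle := List.length_dropWhile_le (fun c => decide (c ≠ '-')) cs
  have hne : cs.dropWhile (· ≠ '-') ≠ [] := by
    intro hd; rw [hd] at h; exact h rfl
  have hpos : 0 < (cs.dropWhile (· ≠ '-')).length := List.length_pos_of_ne_nil hne
  simp only [List.length_drop]
  omega

def create_compounds (s : String) : List String :=
  (pvCoreA s.toList).map String.ofList

-- ===== PORT B =====
def create_compounds_alt (s : String) : List String :=
  let parts0 := PySem.Chars.splitOn s.toList ['-']
  -- parts.pop() with the returned value discarded = dropLast
  let parts := if 1 < parts0.length ∧ PySem.List.pyGetD parts0 (-1) [] = ([] : List Char)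
               then parts0.dropLast else parts0
  let n := parts.length - 1
  (PySem.List.pyRange 0 ((1:Int) <<< n) 1).map (fun mask => String.ofList
    ((parts.drop 1).foldl
      (fun (st : List Char × Int) p =>
        (st.1 ++ (if PySem.Int.band st.2 1 ≠ 0 then ' ' :: p else '-' :: p), st.2 >>> (1:Nat)))
      (PySem.List.pyGetD parts 0 [], mask)).1)

-- ===== PRECONDITION & SPEC =====
def Spec_create_compounds (s : String) (out : List String) : Prop := out = create_compounds_alt s
instance (s : String) (out : List String) : Decidable (Spec_create_compounds s out) := by unfold Spec_create_compounds; infer_instance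

-- ===== CLAIM (what is proved, stated in full; the proofs are below) =====
def Claim_equal_create_compounds : Prop := ∀ (s : String), Dom_create_compounds s → Spec_create_compounds s (create_compounds s)

-- ===== LEMMAS AND PROOFS =====

-- reference split: s.split('-') as structural recursion on the char list
def pvSplit (l : List Char) : List (List Char) :=
  if h : (l.dropWhile (· ≠ '-')) = [] then [l.takeWhile (· ≠ '-')]
  else l.takeWhile (· ≠ '-') :: pvSplit ((l.dropWhile (· ≠ '-')).drop 1)
termination_by l.length
decreasing_by
  have hle := List.length_dropWhile_le (fun c => decide (c ≠ '-')) l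
  have hpos : 0 < (l.dropWhile (· ≠ '-')).length := List.length_pos_of_ne_nil h
  simp only [List.length_drop]
  omega

-- the value enumerated by A: parts joined by every '-'/' ' choice, leftmost varying fastest
def pvEnum : List (List Char) → List (List Char)
  | [] => [[]]
  | [p] => [p]
  | p :: q :: ps => (pvEnum (q :: ps)).flatMap (fun c => [p ++ '-' :: c, p ++ ' ' :: c])

-- drop a single trailing empty part (what B's pop / A's empty-rest stop do)
def pvAdj (xs : List (List Char)) : List (List Char) :=
  if 1 < xs.length ∧ xs.getLast? = some [] then xs.dropLast else xs

theorem pvSplit_ne_nil (l : List Char) : pvSplit l ≠ [] := by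
  unfold pvSplit; split <;> simp

theorem pvSplit_ne_nil_nil (l : List Char) (h : l ≠ []) : pvSplit l ≠ [[]] := by
  rw [pvSplit]
  split
  · rename_i hdw
    intro hc
    simp only [List.cons.injEq, and_true] at hc
    have hall := List.takeWhile_append_dropWhile (p := fun c => decide (c ≠ '-')) (l := l)
    rw [hc, hdw] at hall
    exact h hall.symm
  · intro hc
    have hne := pvSplit_ne_nil ((l.dropWhile (· ≠ '-')).drop 1)
    simp only [List.cons.injEq] at hc
    exact hne hc.2

theorem pvAdj_ne_nil (xs : List (List Char)) (h : xs ≠ []) : pvAdj xs ≠ [] := by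
  unfold pvAdj; split
  · rename_i hc
    cases xs with
    | nil => simp at h
    | cons a t => cases t with
      | nil => simp at hc
      | cons b u => simp
  · exact h

theorem pvAdj_cons (x : List Char) (l : List (List Char)) (h : l ≠ []) (h2 : l ≠ [[]]) :
    pvAdj (x :: l) = x :: pvAdj l := by
  unfold pvAdj
  cases l with
  | nil => simp at h
  | cons b u =>
    cases u with
    | nil =>
      have hb : b ≠ [] := by intro hb; exact h2 (by rw [hb])
      simp [hb]
    | cons c v =>
      by_cases hg : (c :: v).getLast? = some ([] : List Char) <;>
        simp [List.getLast?_cons_cons, hg, List.dropLast_cons_of_ne_nil]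

-- splitOn ['-'] computes pvSplit
theorem pvGo_spec (fuel : Nat) (l cur : List Char) (acc : List (List Char))
    (hf : l.length < fuel) :
    PySem.Chars.splitOn.go ['-'] fuel l cur acc
      = acc.reverse ++ (pvSplit l).modifyHead (cur.reverse ++ ·) := by
  induction fuel generalizing l cur acc with
  | zero => omega
  | succ f ih =>
    cases l with
    | nil =>
      rw [pvSplit]
      simp [PySem.Chars.splitOn.go]
    | cons c rest =>
      by_cases hc : c = '-'
      · subst hc
        rw [PySem.Chars.splitOn.go]
        have h1 : (['-'] : List Char).isPrefixOf ('-' :: rest) = true := by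
          simp [List.isPrefixOf]
        simp only [h1, if_pos]
        have hdrop : List.drop (['-'] : List Char).length ('-' :: rest) = rest := rfl
        rw [hdrop, ih rest [] (List.reverse cur :: acc) (by simp at hf ⊢; omega)]
        conv_rhs => rw [pvSplit]
        have hd : List.dropWhile (fun x => decide (x ≠ '-')) ('-' :: rest) = '-' :: rest := by
          simp [List.dropWhile]
        have ht : List.takeWhile (fun x => decide (x ≠ '-')) ('-' :: rest) = [] := by
          simp [List.takeWhile]
        simp only [hd, ht, reduceCtorEq, dite_false, List.drop_one, List.tail_cons]
        cases hs : pvSplit rest with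
        | nil => exact absurd hs (pvSplit_ne_nil rest)
        | cons a t => simp
      · rw [PySem.Chars.splitOn.go]
        have h1 : (['-'] : List Char).isPrefixOf (c :: rest) = false := by
          simp [List.isPrefixOf]; exact fun he => absurd he.symm hc
        simp only [h1, Bool.false_eq_true, if_false]
        rw [ih rest (c :: cur) acc (by simp at hf ⊢; omega)]
        have hd : List.dropWhile (fun x => decide (x ≠ '-')) (c :: rest)
            = List.dropWhile (fun x => decide (x ≠ '-')) rest := by
          simp [List.dropWhile, hc]
        have ht : List.takeWhile (fun x => decide (x ≠ '-')) (c :: rest)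
            = c :: List.takeWhile (fun x => decide (x ≠ '-')) rest := by
          simp [List.takeWhile, hc]
        conv_rhs => rw [pvSplit]
        conv_lhs => rw [pvSplit]
        simp only [hd, ht]
        split <;> simp

theorem pvSplitOn_eq (l : List Char) :
    PySem.Chars.splitOn l ['-'] = pvSplit l := by
  have h := pvGo_spec (l.length + 1) l [] [] (by omega)
  simp only [List.reverse_nil, List.nil_append] at h
  rw [PySem.Chars.splitOn, h]
  cases pvSplit l <;> simp

-- A computes pvEnum of the adjusted parts
theorem pvCoreA_eq (cs : List Char) : pvCoreA cs = pvEnum (pvAdj (pvSplit cs)) := by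
  rw [pvCoreA, pvSplit]
  cases hd : cs.dropWhile (· ≠ '-') with
  | nil =>
    simp only [List.drop_nil, reduceCtorEq, dite_true]
    simp [pvAdj, pvEnum]
  | cons x xs =>
    cases xs with
    | nil =>
      have h0 : pvSplit ([] : List Char) = [[]] := by rw [pvSplit]; simp
      simp only [List.drop_one, List.tail_cons, reduceCtorEq, dite_false, dite_true, h0]
      simp [pvAdj, pvEnum]
    | cons y ys =>
      have ih := pvCoreA_eq (y :: ys)
      simp only [List.drop_one, List.tail_cons, reduceCtorEq, dite_false]
      rw [ih, pvAdj_cons _ _ (pvSplit_ne_nil _) (pvSplit_ne_nil_nil _ (by simp))]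
      cases he : pvAdj (pvSplit (y :: ys)) with
      | nil => exact absurd he (pvAdj_ne_nil _ (pvSplit_ne_nil _))
      | cons a t => rw [pvEnum]
termination_by cs.length
decreasing_by
  have hle := List.length_dropWhile_le (fun c => decide (c ≠ '-')) cs
  rw [hd] at hle
  simp only [List.length_cons] at hle ⊢
  omega

-- the fold in B, as a function of (head so far, remaining mask)
def pvFold (ps : List (List Char)) (st : List Char × Int) : List Char :=
  (ps.foldl
    (fun (st : List Char × Int) p =>
      (st.1 ++ (if PySem.Int.band st.2 1 ≠ 0 then ' ' :: p else '-' :: p), st.2 >>> (1:Nat)))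
    st).1

theorem pvFold_append (ps : List (List Char)) (a b : List Char) (m : Int) :
    pvFold ps (a ++ b, m) = a ++ pvFold ps (b, m) := by
  induction ps generalizing b m with
  | nil => simp [pvFold]
  | cons p qs ih =>
    simp only [pvFold, List.foldl_cons] at *
    rw [List.append_assoc]
    exact ih _ _

theorem pvMapRangeDouble {α : Type} (f : Nat → α) (N : Nat) :
    (List.range (2*N)).map f = (List.range N).flatMap (fun q => [f (2*q), f (2*q+1)]) := by
  induction N with
  | zero => simp
  | succ n ih =>
    have h2 : 2 * (n+1) = (2*n + 1) + 1 := by omega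
    rw [h2, List.range_succ, List.range_succ, List.range_succ]
    simp [ih]

-- B's bitmask map computes pvEnum
theorem pvB_enum (ps : List (List Char)) (head : List Char) :
    (PySem.List.pyRange 0 ((1:Int) <<< ps.length) 1).map (fun mask => pvFold ps (head, mask))
      = pvEnum (head :: ps) := by
  induction ps generalizing head with
  | nil =>
    have h1 : (1:Int) <<< (0:Nat) = ((1:Nat) : Int) := by decide
    rw [List.length_nil, h1, PySem.List.pyRange_zero_nat 1]
    simp [pvFold, pvEnum]
  | cons p qs ih =>
    have hsl : (1:Int) <<< (p :: qs).length = ((2 * 2^qs.length : Nat) : Int) := by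
      simp [Int.shiftLeft_eq]; ring
    have hsl2 : (1:Int) <<< qs.length = ((2^qs.length : Nat) : Int) := by
      simp [Int.shiftLeft_eq]
    rw [hsl, PySem.List.pyRange_zero_nat, List.map_map, pvMapRangeDouble]
    rw [pvEnum, ← ih p, hsl2, PySem.List.pyRange_zero_nat, List.map_map]
    rw [List.flatMap_def, List.flatMap_def, List.map_map]
    congr 1
    refine List.map_congr_left (fun q _ => ?_)
    have hb0 : ¬ (PySem.Int.band ((2*q : Nat) : Int) 1 ≠ 0) := by
      have h := PySem.Int.band_natCast (2*q) 1; simp at h; simp [h]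
    have hb1 : PySem.Int.band ((2*q+1 : Nat) : Int) 1 ≠ 0 := by
      have h := PySem.Int.band_natCast (2*q+1) 1; simp at h; simp [h]
    have hs0 : ((2*q : Nat) : Int) >>> (1:Nat) = (q : Int) := by
      simp [Int.shiftRight_eq_div_pow]
    have hs1 : ((2*q+1 : Nat) : Int) >>> (1:Nat) = (q : Int) := by
      simp [Int.shiftRight_eq_div_pow]; omega
    simp only [Function.comp_apply, pvFold, List.foldl_cons]
    rw [if_neg hb0, if_pos hb1, hs0, hs1]
    have e1 := pvFold_append qs head ('-' :: p) (q : Int)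
    have e2 := pvFold_append qs head (' ' :: p) (q : Int)
    have e3 := pvFold_append qs ['-'] p (q : Int)
    have e4 := pvFold_append qs [' '] p (q : Int)
    simp only [pvFold, List.singleton_append] at e1 e2 e3 e4
    rw [e1, e2, e3, e4]

-- ===== VERDICT (by name: the statement is the Claim_ definition above) =====
theorem create_compounds_spec : Claim_equal_create_compounds := by
  intro s _
  unfold Spec_create_compounds create_compounds create_compounds_alt
  rw [pvSplitOn_eq]
  have hne : pvSplit s.toList ≠ [] := pvSplit_ne_nil _
  have hcond : (if 1 < (pvSplit s.toList).length ∧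
        PySem.List.pyGetD (pvSplit s.toList) (-1) [] = ([] : List Char)
      then (pvSplit s.toList).dropLast else pvSplit s.toList) = pvAdj (pvSplit s.toList) := by
    rw [PySem.List.pyGetD_neg_one _ [] hne, pvAdj, List.getLast?_eq_some_getLast hne]
    simp
  simp only [hcond]
  have hane : pvAdj (pvSplit s.toList) ≠ [] := pvAdj_ne_nil _ hne
  obtain ⟨h0, t, hparts⟩ := List.exists_cons_of_ne_nil hane
  rw [pvCoreA_eq, hparts]
  have hhead : PySem.List.pyGetD (h0 :: t) 0 [] = h0 := by
    simp [PySem.List.pyGetD_zero]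
  simp only [List.drop_one, List.tail_cons, List.length_cons, Nat.add_sub_cancel, hhead]
  rw [← pvB_enum t h0]
  simp [pvFold]
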